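-- pv_equiv track=rewrite | github.com/minebean0502/Programmers | 프로그래머스/unrated/181893. 배열 조각하기/배열 조각하기.py | solution
-- ===== SOURCE A (Python) =====
-- def solution(arr, query):
--     answer = []
--     for i in range(len(query)):
--         if i % 2 == 0:
--             arr = arr[:query[i]+1]
--         elif i % 2 != 0:
--             arr = arr[query[i]:]
--     return arr
-- ===== SOURCE B (Python) =====
-- def solution(arr, query):
--     # track [lo, hi) bounds into the original arr, slice once at the end
--     lo, hi = 0, len(arr)
--     for i, q in enumerate(query):
--         n = hi - lo
--         if i % 2 == 0:
--             e = q + 1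
--             e = max(n + e, 0) if e < 0 else min(e, n)
--             hi = lo + e
--         else:
--             s = max(n + q, 0) if q < 0 else min(q, n)
--             lo = lo + s
--     return arr[lo:hi]
-- ===== Notes on version B (the rewrite author's own statement) =====
-- stated objective: alternative
-- what changed: Instead of materialising a new list slice per query, B tracks the current [lo, hi) window into the original array with O(1) clamped-bound arithmetic per query and slices once at the end.
import Mathlib
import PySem

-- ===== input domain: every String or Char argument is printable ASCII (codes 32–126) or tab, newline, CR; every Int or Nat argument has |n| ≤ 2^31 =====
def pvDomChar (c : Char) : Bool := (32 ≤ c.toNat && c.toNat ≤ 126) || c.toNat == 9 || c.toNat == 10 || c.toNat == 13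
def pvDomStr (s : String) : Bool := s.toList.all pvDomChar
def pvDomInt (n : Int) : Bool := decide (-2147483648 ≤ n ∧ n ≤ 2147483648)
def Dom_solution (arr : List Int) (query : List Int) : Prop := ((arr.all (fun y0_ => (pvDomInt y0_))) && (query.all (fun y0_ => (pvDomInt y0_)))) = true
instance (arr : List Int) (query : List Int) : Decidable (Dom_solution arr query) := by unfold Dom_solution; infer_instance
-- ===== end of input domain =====

-- B replaces A's repeated list slicing by per-query window-bound arithmetic and one final slice (objective: alternative).

-- ===== PORT A =====
-- the loop 'for i in range(len(query))' walking query with its index i, re-slicing arr each step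
def solutionLoop (i : Nat) (arr : List Int) : List Int → List Int
  | [] => arr
  | q :: rest =>
      solutionLoop (i + 1)
        (if i % 2 == 0 then PySem.List.slice arr none (some (q + 1))
         else PySem.List.slice arr (some q) none)
        rest

def solution (arr : List Int) (query : List Int) : List Int :=
  solutionLoop 0 arr query

-- ===== PORT B =====
-- Source B's loop: clamp each query to the current window length n, update lo/hi (all values stay ≥ 0, so Nat)
def solutionAltLoop (i : Nat) (lo hi : Nat) : List Int → Nat × Nat
  | [] => (lo, hi)
  | q :: rest =>
      let n := hi - lo
      if i % 2 == 0 then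
        let e := q + 1
        let e' : Nat := if e < 0 then n - (-e).toNat else min e.toNat n
        solutionAltLoop (i + 1) lo (lo + e') rest
      else
        let s' : Nat := if q < 0 then n - (-q).toNat else min q.toNat n
        solutionAltLoop (i + 1) (lo + s') hi rest

def solution_alt (arr : List Int) (query : List Int) : List Int :=
  let b := solutionAltLoop 0 0 arr.length query
  PySem.List.slice arr (some (b.1 : Int)) (some (b.2 : Int))

-- ===== PRECONDITION & SPEC =====
def Spec_solution (arr : List Int) (query : List Int) (out : List Int) : Prop := out = solution_alt arr query
instance (arr : List Int) (query : List Int) (out : List Int) : Decidable (Spec_solution arr query out) := by unfold Spec_solution; infer_instance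

-- ===== CLAIM (what is proved, stated in full; the proofs are below) =====
def Claim_equal_solution : Prop := ∀ (arr : List Int) (query : List Int), Dom_solution arr query → Spec_solution arr query (solution arr query)

-- ===== LEMMAS AND PROOFS =====

-- even step: slicing a list with [:q+1] is taking the Python-clamped count
theorem sliceEven (cur : List Int) (q : Int) :
    PySem.List.slice cur none (some (q + 1)) =
      cur.take (if q + 1 < 0 then cur.length - (-(q + 1)).toNat else (q + 1).toNat) := by
  by_cases h : q + 1 < 0
  · rw [if_pos h]
    have he : q + 1 = -(((-(q + 1)).toNat : Nat) : Int) := by omega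
    conv_lhs => rw [he]
    exact PySem.List.slice_to_neg_natCast cur _ (by omega)
  · rw [if_neg h]
    exact PySem.List.slice_to cur (by omega)

-- odd step: slicing a list with [q:] is dropping the Python-clamped count
theorem sliceOdd (cur : List Int) (q : Int) :
    PySem.List.slice cur (some q) none =
      cur.drop (if q < 0 then cur.length - (-q).toNat else q.toNat) := by
  by_cases h : q < 0
  · rw [if_pos h]
    have he : q = -(((-q).toNat : Nat) : Int) := by omega
    conv_lhs => rw [he]
    exact PySem.List.slice_from_neg_natCast cur _ (by omega)
  · rw [if_neg h]
    exact PySem.List.slice_from cur (by omega)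

-- main invariant: A's current arr is exactly the window arr0[lo:hi] maintained by B's loop
theorem loop_eq (query : List Int) (arr0 : List Int) (i lo hi : Nat)
    (h1 : lo <= hi) (h2 : hi <= arr0.length) :
    solutionLoop i ((arr0.drop lo).take (hi - lo)) query =
      (fun b : Nat × Nat => (arr0.drop b.1).take (b.2 - b.1))
        (solutionAltLoop i lo hi query) := by
  induction query generalizing i lo hi with
  | nil => simp [solutionLoop, solutionAltLoop]
  | cons q rest ih =>
    have hlen : ((arr0.drop lo).take (hi - lo)).length = hi - lo := by
      simp; omega
    cases hp : (i % 2 == 0) with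
    | true =>
      set e' : Nat := if q + 1 < 0 then (hi - lo) - (-(q + 1)).toNat else min (q + 1).toNat (hi - lo) with he'
      have he'le : e' <= hi - lo := by rw [he']; split <;> omega
      have hstep : PySem.List.slice ((arr0.drop lo).take (hi - lo)) none (some (q + 1)) =
          (arr0.drop lo).take ((lo + e') - lo) := by
        rw [sliceEven, hlen, List.take_take]
        congr 1
        rw [he']
        by_cases h : q + 1 < 0
        · simp only [if_pos h]; omega
        · simp only [if_neg h]; omega
      simp only [solutionLoop, solutionAltLoop, hp, if_true]
      rw [hstep]
      have := ih (i + 1) lo (lo + e') (by omega) (by omega)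
      simpa [he'] using this
    | false =>
      set s' : Nat := if q < 0 then (hi - lo) - (-q).toNat else min q.toNat (hi - lo) with hs'
      have hs'le : s' <= hi - lo := by rw [hs']; split <;> omega
      have hstep : PySem.List.slice ((arr0.drop lo).take (hi - lo)) (some q) none =
          (arr0.drop (lo + s')).take (hi - (lo + s')) := by
        rw [sliceOdd, hlen, List.drop_take, List.drop_drop]
        by_cases h : q < 0
        · have hsv : s' = (hi - lo) - (-q).toNat := by rw [hs', if_pos h]
          rw [if_pos h]
          have h1' : hi - lo - ((hi - lo) - (-q).toNat) = hi - (lo + s') := by omega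
          have h2' : lo + ((hi - lo) - (-q).toNat) = lo + s' := by omega
          rw [h1', h2']
        · have hsv : s' = min q.toNat (hi - lo) := by rw [hs', if_neg h]
          rw [if_neg h]
          by_cases hle : q.toNat <= hi - lo
          · have h1' : hi - lo - q.toNat = hi - (lo + s') := by omega
            have h2' : lo + q.toNat = lo + s' := by omega
            rw [h1', h2']
          · have h1' : hi - lo - q.toNat = 0 := by omega
            have h2' : hi - (lo + s') = 0 := by omega
            rw [h1', h2']
            simp
      simp only [solutionLoop, solutionAltLoop, hp]
      rw [hstep]
      have := ih (i + 1) (lo + s') hi (by omega) h2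
      simpa [hs'] using this

-- ===== VERDICT (by name: the statement is the Claim_ definition above) =====
theorem solution_spec : Claim_equal_solution := by
  intro arr query _
  unfold Spec_solution solution solution_alt
  have h := loop_eq query arr 0 0 arr.length (by omega) (by omega)
  simp only [List.drop_zero, Nat.sub_zero, List.take_length] at h
  rw [h, PySem.List.slice_natCast]
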